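-- pv_equiv track=rewrite | github.com/MrBrantCode/unitest_baseline | mut_generate/mist_train_cf/cf_29761/solution.py | findEqualCandiesTotalNumber
-- ===== SOURCE A (Python) =====
-- from typing import List
--
-- def findEqualCandiesTotalNumber(candies_weights: List[int]) -> int:
--     number_of_candies = len(candies_weights)
--     alice_pos = 0
--     bob_pos = number_of_candies - 1
--     alice_current_weight = 0
--     bob_current_weight = 0
--     last_equal_candies_total_number = 0
--
--     while alice_pos <= bob_pos:
--         if alice_current_weight <= bob_current_weight:
--             alice_current_weight += candies_weights[alice_pos]
--             alice_pos += 1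
--         else:
--             bob_current_weight += candies_weights[bob_pos]
--             bob_pos -= 1
--
--         if alice_current_weight == bob_current_weight:
--             last_equal_candies_total_number = alice_current_weight + bob_current_weight
--
--     return last_equal_candies_total_number
-- ===== SOURCE B (Python) =====
-- from typing import List
--
-- def findEqualCandiesTotalNumber(candies_weights: List[int]) -> int:
--     n = len(candies_weights)
--     prefix = [0]
--     for w in candies_weights:
--         prefix.append(prefix[-1] + w)
--     suffix = [0]
--     for w in reversed(candies_weights):
--         suffix.append(suffix[-1] + w)
--     a = 0
--     equal_values = []
--     for i in range(n):
--         if prefix[a] <= suffix[i - a]: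
--             a += 1
--         if prefix[a] == suffix[i + 1 - a]:
--             equal_values.append(2 * prefix[a])
--     return equal_values[-1] if equal_values else 0
-- ===== Notes on version B (the rewrite author's own statement) =====
-- stated objective: alternative
-- what changed: Replaces the two-pointer walk with mutating Alice/Bob weight accumulators and a last-equality variable by precomputed prefix and suffix sum tables plus a single loop over the step index that maintains only Alice's candy count, collects the equality values 2*prefix[a] in a list and returns the last one (0 if none).
import Mathlib
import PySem

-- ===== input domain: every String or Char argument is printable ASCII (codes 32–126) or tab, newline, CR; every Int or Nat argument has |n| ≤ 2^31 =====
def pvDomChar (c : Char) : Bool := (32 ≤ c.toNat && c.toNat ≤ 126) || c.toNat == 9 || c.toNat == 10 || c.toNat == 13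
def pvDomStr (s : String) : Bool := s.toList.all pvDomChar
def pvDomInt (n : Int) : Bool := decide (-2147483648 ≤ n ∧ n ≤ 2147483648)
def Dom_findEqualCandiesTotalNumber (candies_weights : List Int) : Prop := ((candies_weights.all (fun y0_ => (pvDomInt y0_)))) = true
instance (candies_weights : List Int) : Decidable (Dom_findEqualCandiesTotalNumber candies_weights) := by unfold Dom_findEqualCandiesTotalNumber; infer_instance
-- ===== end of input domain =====

-- B replaces A's two-pointer walk with mutating weight accumulators by precomputed
-- prefix/suffix sum tables and a single counted loop that collects equality values
-- and returns the last one; objective: alternative (same O(n) cost, different structure).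


-- ===== PORT A =====
-- A's while loop; indices are always in range when called from the entry point
-- (0 ≤ alice_pos ≤ bob_pos < length), so the `.getD 0` default is never used.
def loopA (ws : List Int) (alice_pos bob_pos aW bW last : Int) : Int :=
  if _h : alice_pos ≤ bob_pos then
    if aW ≤ bW then
      let aW' := aW + (PySem.List.pyGet? ws alice_pos).getD 0
      let last' := if aW' = bW then aW' + bW else last
      loopA ws (alice_pos + 1) bob_pos aW' bW last'
    else
      let bW' := bW + (PySem.List.pyGet? ws bob_pos).getD 0
      let last' := if aW = bW' then aW + bW' else last
      loopA ws alice_pos (bob_pos - 1) aW bW' last'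
  else last
termination_by (bob_pos + 1 - alice_pos).toNat
decreasing_by all_goals omega

def findEqualCandiesTotalNumber (candies_weights : List Int) : Int :=
  loopA candies_weights 0 ((candies_weights.length : Int) - 1) 0 0 0

-- ===== PORT B =====
def altStep (P S : List Int) (st : Nat × List Int) (i : Nat) : Nat × List Int :=
  let a := if P.getD st.1 0 ≤ S.getD (i - st.1) 0 then st.1 + 1 else st.1
  let vals := if P.getD a 0 = S.getD (i + 1 - a) 0 then st.2 ++ [2 * P.getD a 0] else st.2
  (a, vals)

def findEqualCandiesTotalNumber_alt (candies_weights : List Int) : Int :=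
  let P := candies_weights.scanl (· + ·) 0
  let S := candies_weights.reverse.scanl (· + ·) 0
  let r := (List.range candies_weights.length).foldl (altStep P S) (0, [])
  (r.2.getLast?).getD 0

-- ===== PRECONDITION & SPEC =====
def Spec_findEqualCandiesTotalNumber (candies_weights : List Int) (out : Int) : Prop := out = findEqualCandiesTotalNumber_alt candies_weights
instance (candies_weights : List Int) (out : Int) : Decidable (Spec_findEqualCandiesTotalNumber candies_weights out) := by unfold Spec_findEqualCandiesTotalNumber; infer_instance

-- ===== CLAIM (what is proved, stated in full; the proofs are below) =====
def Claim_equal_findEqualCandiesTotalNumber : Prop := ∀ (candies_weights : List Int), Dom_findEqualCandiesTotalNumber candies_weights → Spec_findEqualCandiesTotalNumber candies_weights (findEqualCandiesTotalNumber candies_weights)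

-- ===== LEMMAS AND PROOFS =====

lemma scanl_getD_zero (l : List Int) (b : Int) : (l.scanl (· + ·) b).getD 0 0 = b := by
  cases l <;> simp [List.scanl_nil, List.scanl_cons]

lemma scanl_getD_succ (l : List Int) (b : Int) (j : Nat) (hj : j < l.length) :
    (l.scanl (· + ·) b).getD (j + 1) 0 = (l.scanl (· + ·) b).getD j 0 + l.getD j 0 := by
  induction l generalizing b j with
  | nil => simp at hj
  | cons x xs ih =>
    cases j with
    | zero => rw [List.scanl_cons]; simp only [List.getD_cons_succ, List.getD_cons_zero]; rw [scanl_getD_zero]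
    | succ j =>
      rw [List.scanl_cons]
      simp only [List.getD_cons_succ]
      exact ih (b + x) j (by simpa using hj)

lemma altStep_left (P S : List Int) (a i : Nat) (acc : List Int) (ha : a ≤ i)
    (h : P.getD a 0 ≤ S.getD (i - a) 0) :
    altStep P S (a, acc) i =
      (a + 1, if P.getD (a + 1) 0 = S.getD (i - a) 0 then acc ++ [2 * P.getD (a + 1) 0] else acc) := by
  simp only [altStep, if_pos h]
  rw [show i + 1 - (a + 1) = i - a by omega]

lemma altStep_right (P S : List Int) (a i : Nat) (acc : List Int) (ha : a ≤ i)
    (h : ¬ P.getD a 0 ≤ S.getD (i - a) 0) :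
    altStep P S (a, acc) i =
      (a, if P.getD a 0 = S.getD (i - a + 1) 0 then acc ++ [2 * P.getD a 0] else acc) := by
  simp only [altStep, if_neg h]
  rw [show i + 1 - a = i - a + 1 by omega]

lemma sim (ws : List Int) (m a k : Nat) (acc : List Int)
    (hmn : a + k + m = ws.length) :
    loopA ws (a : Int) ((ws.length : Int) - 1 - (k : Int))
      ((ws.scanl (· + ·) 0).getD a 0) ((ws.reverse.scanl (· + ·) 0).getD k 0)
      (acc.getLast?.getD 0)
    = (((List.range' (a + k) m).foldl
        (altStep (ws.scanl (· + ·) 0) (ws.reverse.scanl (· + ·) 0)) (a, acc)).2.getLast?).getD 0 := by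
  induction m generalizing a k acc with
  | zero =>
    rw [loopA]
    have : ¬ ((a : Int) ≤ (ws.length : Int) - 1 - (k : Int)) := by omega
    simp [this]
  | succ m ih =>
    have hbound : (a : Int) ≤ (ws.length : Int) - 1 - (k : Int) := by omega
    rw [List.range'_succ, List.foldl_cons, loopA, dif_pos hbound]
    set P := ws.scanl (· + ·) 0 with hP
    set S := ws.reverse.scanl (· + ·) 0 with hS
    have hik : a + k - a = k := by omega
    by_cases hc : P.getD a 0 ≤ S.getD k 0
    · -- alice eats candy a
      have haw : (PySem.List.pyGet? ws (a : Int)).getD 0 = ws.getD a 0 := by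
        rw [PySem.List.pyGet?_natCast, List.getD_eq_getElem?_getD]
      have hPs : P.getD (a + 1) 0 = P.getD a 0 + ws.getD a 0 :=
        scanl_getD_succ ws 0 a (by omega)
      rw [if_pos hc]
      simp only [haw, ← hPs]
      rw [altStep_left P S a (a + k) acc (by omega) (by rwa [hik])]
      rw [hik]
      by_cases he : P.getD (a + 1) 0 = S.getD k 0
      · rw [if_pos he, if_pos he]
        have := ih (a + 1) k (acc ++ [2 * P.getD (a + 1) 0]) (by omega)
        simp only [List.getLast?_concat, Option.getD_some] at this
        rw [show P.getD (a + 1) 0 + S.getD k 0 = 2 * P.getD (a + 1) 0 by omega,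
          show ((a : Int) + 1) = ((a + 1 : Nat) : Int) by push_cast; ring,
          show a + k + 1 = a + 1 + k by omega]
        exact this
      · rw [if_neg he, if_neg he]
        have := ih (a + 1) k acc (by omega)
        rw [show ((a : Int) + 1) = ((a + 1 : Nat) : Int) by push_cast; ring,
          show a + k + 1 = a + 1 + k by omega]
        exact this
    · -- bob eats candy length - 1 - k
      have hk : k < ws.length := by omega
      have hbid : (ws.length : Int) - 1 - (k : Int) = ((ws.length - 1 - k : Nat) : Int) := by omega
      have hbw : (PySem.List.pyGet? ws ((ws.length : Int) - 1 - (k : Int))).getD 0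
          = ws.reverse.getD k 0 := by
        rw [hbid, PySem.List.pyGet?_natCast, List.getD_eq_getElem?_getD,
          List.getElem?_reverse hk]
      have hSs : S.getD (k + 1) 0 = S.getD k 0 + ws.reverse.getD k 0 :=
        scanl_getD_succ ws.reverse 0 k (by simpa using hk)
      rw [if_neg hc]
      simp only [hbw, ← hSs]
      rw [altStep_right P S a (a + k) acc (by omega) (by rwa [hik])]
      rw [hik]
      by_cases he : P.getD a 0 = S.getD (k + 1) 0
      · rw [if_pos he, if_pos he]
        have := ih a (k + 1) (acc ++ [2 * P.getD a 0]) (by omega)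
        simp only [List.getLast?_concat, Option.getD_some] at this
        rw [show P.getD a 0 + S.getD (k + 1) 0 = 2 * P.getD a 0 by omega,
          show (ws.length : Int) - 1 - (k : Int) - 1 = (ws.length : Int) - 1 - ((k + 1 : Nat) : Int) by push_cast; ring,
          show a + k + 1 = a + (k + 1) by omega]
        exact this
      · rw [if_neg he, if_neg he]
        have := ih a (k + 1) acc (by omega)
        rw [show (ws.length : Int) - 1 - (k : Int) - 1 = (ws.length : Int) - 1 - ((k + 1 : Nat) : Int) by push_cast; ring,
          show a + k + 1 = a + (k + 1) by omega]
        exact this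

-- ===== VERDICT (by name: the statement is the Claim_ definition above) =====
theorem findEqualCandiesTotalNumber_spec : Claim_equal_findEqualCandiesTotalNumber := by
  intro ws _
  unfold Spec_findEqualCandiesTotalNumber findEqualCandiesTotalNumber findEqualCandiesTotalNumber_alt
  have := sim ws ws.length 0 0 [] (by omega)
  simp only [scanl_getD_zero, List.getLast?_nil, Option.getD_none, Nat.cast_zero,
    Nat.add_zero, sub_zero] at this
  rw [List.range_eq_range']
  exact this
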